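-- pv_equiv track=rewrite | github.com/jeffpar/argument-aloud | scripts/old/advocatemap.py | audio_index_for_date
-- ===== SOURCE A (Python) =====
-- def audio_index_for_date(audio_list: list, iso_date: str | None) -> int:
--     """Return 1-based index of the audio entry whose date matches iso_date.
--
--     The list is sorted by date ascending before indexing (matching how the
--     player resolves sortedAudio). Returns 1 if no match or no date given.
--     """
--     if not audio_list:
--         return 1
--     sorted_audio = sorted(audio_list, key=lambda a: (a.get('date') or ''))
--     if iso_date:
--         for i, entry in enumerate(sorted_audio):
--             if entry.get('date') == iso_date:
--                 return i + 1
--     return 1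
-- ===== SOURCE B (Python) =====
-- def audio_index_for_date(audio_list: list, iso_date: str | None) -> int:
--     """Single pass: 1 + number of entries sorting strictly before iso_date,
--     if any entry's date matches; else 1. No sort needed."""
--     if not iso_date:
--         return 1
--     found = False
--     less = 0
--     for entry in audio_list:
--         d = entry.get('date')
--         if d == iso_date:
--             found = True
--         elif (d or '') < iso_date:
--             less += 1
--     return less + 1 if found else 1
-- ===== Notes on version B (the rewrite author's own statement) =====
-- stated objective: alternative
-- what changed: Replaces sort-then-linear-scan with a single unsorted pass that counts entries whose date key sorts strictly before iso_date and checks whether any entry matches, exploiting stability of the sort.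
import Mathlib
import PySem

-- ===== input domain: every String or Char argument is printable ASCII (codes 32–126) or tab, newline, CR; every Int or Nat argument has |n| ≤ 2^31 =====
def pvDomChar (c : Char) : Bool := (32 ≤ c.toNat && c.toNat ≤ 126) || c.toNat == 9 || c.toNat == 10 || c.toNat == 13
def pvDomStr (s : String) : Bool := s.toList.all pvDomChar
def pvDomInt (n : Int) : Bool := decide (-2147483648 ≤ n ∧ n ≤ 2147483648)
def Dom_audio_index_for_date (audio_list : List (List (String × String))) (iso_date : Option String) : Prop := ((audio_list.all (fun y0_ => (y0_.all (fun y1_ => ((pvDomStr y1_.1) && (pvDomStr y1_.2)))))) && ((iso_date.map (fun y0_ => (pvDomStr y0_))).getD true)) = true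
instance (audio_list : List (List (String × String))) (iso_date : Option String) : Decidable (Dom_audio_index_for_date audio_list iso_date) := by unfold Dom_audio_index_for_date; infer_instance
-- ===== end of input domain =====

-- B replaces sort-then-scan by a single counting pass (no sort); return value only.

-- ===== PORT A =====
-- a.get('date') or ''  (None and '' both fall to '')
def pvKeyA (e : List (String × String)) : String := ((PySem.Dict.mk e).get? "date").getD ""

-- 'for i, entry in enumerate(sorted_audio): if entry.get('date') == iso_date: return i + 1' then 'return 1'
def pvFindA (s : String) : Int → List (List (String × String)) → Int
  | _, [] => 1
  | i, e :: t => if (PySem.Dict.mk e).get? "date" = some s then i + 1 else pvFindA s (i + 1) t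

def audio_index_for_date (audio_list : List (List (String × String))) (iso_date : Option String) : Int :=
  if audio_list = [] then 1
  else
    let sorted_audio := PySem.List.sorted audio_list pvKeyA false
    match iso_date with
    | some s => if s ≠ "" then pvFindA s 0 sorted_audio else 1
    | none => 1

-- ===== PORT B =====
-- loop body: found/less update for one entry
def pvStepB (s : String) (p : Bool × Int) (e : List (String × String)) : Bool × Int :=
  let d := (PySem.Dict.mk e).get? "date"
  if d = some s then (true, p.2)
  else if d.getD "" < s then (p.1, p.2 + 1)
  else p

def audio_index_for_date_alt (audio_list : List (List (String × String))) (iso_date : Option String) : Int :=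
  match iso_date with
  | none => 1
  | some s =>
    if s = "" then 1
    else
      let r := audio_list.foldl (pvStepB s) (false, 0)
      if r.1 then r.2 + 1 else 1

-- ===== PRECONDITION & SPEC =====
def Spec_audio_index_for_date (audio_list : List (List (String × String))) (iso_date : Option String) (out : Int) : Prop := out = audio_index_for_date_alt audio_list iso_date
instance (audio_list : List (List (String × String))) (iso_date : Option String) (out : Int) : Decidable (Spec_audio_index_for_date audio_list iso_date out) := by unfold Spec_audio_index_for_date; infer_instance

-- ===== CLAIM (what is proved, stated in full; the proofs are below) =====
def Claim_equal_audio_index_for_date : Prop := ∀ (audio_list : List (List (String × String))) (iso_date : Option String), Dom_audio_index_for_date audio_list iso_date → Spec_audio_index_for_date audio_list iso_date (audio_index_for_date audio_list iso_date)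

-- ===== LEMMAS AND PROOFS =====

-- key equals s (s nonempty) iff the entry's date is exactly s
lemma pvKeyA_eq_iff (e : List (String × String)) (s : String) (hs : s ≠ "") :
    pvKeyA e = s ↔ (PySem.Dict.mk e).get? "date" = some s := by
  unfold pvKeyA
  rcases h : (PySem.Dict.mk e).get? "date" with _ | d
  · simp only [Option.getD_none]
    exact ⟨fun h' => absurd h'.symm hs, fun h' => nomatch h'⟩
  · simp only [Option.getD_some, Option.some.injEq]

-- A's scan over a key-sorted list: 1 + (position of first match) = 1 + #(key < s), or 1 if no match
lemma pvFindA_spec (s : String) (hs : s ≠ "") :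
    ∀ (l : List (List (String × String))) (i : Int),
      l.Pairwise (fun a b => pvKeyA a ≤ pvKeyA b) →
      pvFindA s i l =
        if l.any (fun e => decide ((PySem.Dict.mk e).get? "date" = some s))
        then i + (l.countP (fun e => decide (pvKeyA e < s)) : Int) + 1
        else 1 := by
  intro l
  induction l with
  | nil => intro i _; simp [pvFindA]
  | cons e t ih =>
    intro i hp
    rw [List.pairwise_cons] at hp
    by_cases hm : (PySem.Dict.mk e).get? "date" = some s
    · -- match at head: everything after has key ≥ s, count of key<s is 0
      have hke : pvKeyA e = s := (pvKeyA_eq_iff e s hs).mpr hm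
      have hcnt : t.countP (fun x => decide (pvKeyA x < s)) = 0 := by
        rw [List.countP_eq_zero]
        intro x hx
        simp only [decide_eq_true_eq]
        exact not_lt.mpr (hke ▸ hp.1 x hx)
      have hne : (decide (pvKeyA e < s)) = false :=
        decide_eq_false (by rw [hke]; exact lt_irrefl s)
      have hany : ((e :: t).any fun x => decide ((PySem.Dict.mk x).get? "date" = some s)) = true := by
        simp [hm]
      rw [show pvFindA s i (e :: t) = i + 1 from by simp [pvFindA, hm]]
      rw [if_pos hany, List.countP_cons, hcnt, hne]
      norm_num
    · have hke : pvKeyA e ≠ s := fun h => hm ((pvKeyA_eq_iff e s hs).mp h)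
      rw [show pvFindA s i (e :: t) = pvFindA s (i + 1) t from by simp [pvFindA, hm]]
      rw [ih (i + 1) hp.2]
      by_cases hany : (t.any fun x => decide ((PySem.Dict.mk x).get? "date" = some s)) = true
      · -- a match exists in t, so key e ≤ key(match) = s hence key e < s
        obtain ⟨x, hx, hxs⟩ := List.any_eq_true.mp hany
        have hkx : pvKeyA x = s := (pvKeyA_eq_iff x s hs).mpr (of_decide_eq_true hxs)
        have hlt : pvKeyA e < s := lt_of_le_of_ne (hkx ▸ hp.1 x hx) hke
        have hany' : ((e :: t).any fun x => decide ((PySem.Dict.mk x).get? "date" = some s)) = true := by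
          simp [hany]
        rw [if_pos hany, if_pos hany', List.countP_cons, decide_eq_true hlt]
        simp only [if_true]
        push_cast
        ring
      · have hany' : ¬ ((e :: t).any fun x => decide ((PySem.Dict.mk x).get? "date" = some s)) = true := by
          simp [hm, eq_false_of_ne_true hany]
        rw [if_neg hany, if_neg hany']

-- B's fold computes (any match, count of strict-less non-matching keys)
lemma pvFoldB_spec (s : String) (l : List (List (String × String))) :
    ∀ (b : Bool) (n : Int),
      l.foldl (pvStepB s) (b, n) =
      (b || l.any (fun e => decide ((PySem.Dict.mk e).get? "date" = some s)),
       n + (l.countP (fun e => decide (¬ (PySem.Dict.mk e).get? "date" = some s ∧ pvKeyA e < s)) : Int)) := by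
  induction l with
  | nil => intro b n; simp
  | cons e t ih =>
    intro b n
    rw [List.foldl_cons, List.any_cons, List.countP_cons]
    by_cases hm : (PySem.Dict.mk e).get? "date" = some s
    · have hd : (decide (¬ (PySem.Dict.mk e).get? "date" = some s ∧ pvKeyA e < s)) = false :=
        decide_eq_false (fun h => h.1 hm)
      rw [show pvStepB s (b, n) e = (true, n) from by simp [pvStepB, hm]]
      rw [ih true n, hd, decide_eq_true hm]
      simp
    · by_cases hl : pvKeyA e < s
      · have hd : (decide (¬ (PySem.Dict.mk e).get? "date" = some s ∧ pvKeyA e < s)) = true :=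
          decide_eq_true ⟨hm, hl⟩
        rw [show pvStepB s (b, n) e = (b, n + 1) from by
          simp only [pvStepB]
          rw [if_neg hm, show ((PySem.Dict.mk e).get? "date").getD "" = pvKeyA e from rfl, if_pos hl]]
        rw [ih b (n + 1), hd, decide_eq_false hm]
        simp only [Bool.false_or, Prod.mk.injEq, if_true, true_and]
        push_cast
        ring
      · have hd : (decide (¬ (PySem.Dict.mk e).get? "date" = some s ∧ pvKeyA e < s)) = false :=
          decide_eq_false (fun h => hl h.2)
        rw [show pvStepB s (b, n) e = (b, n) from by
          simp only [pvStepB]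
          rw [if_neg hm, show ((PySem.Dict.mk e).get? "date").getD "" = pvKeyA e from rfl, if_neg hl]]
        rw [ih b n, hd, decide_eq_false hm]
        simp

-- ===== VERDICT (by name: the statement is the Claim_ definition above) =====
theorem audio_index_for_date_spec : Claim_equal_audio_index_for_date := by
  intro al iso _
  unfold Spec_audio_index_for_date audio_index_for_date audio_index_for_date_alt
  cases iso with
  | none => simp
  | some s =>
    by_cases hs : s = ""
    · simp [hs]
    · simp only [hs, ne_eq, not_false_iff, if_true, if_false]
      by_cases hnil : al = []
      · subst hnil; simp
      · simp only [hnil, if_false]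
        rw [pvFindA_spec s hs _ 0 (PySem.List.sorted_pairwise al pvKeyA)]
        rw [pvFoldB_spec s al false 0]
        have hperm : (PySem.List.sorted al pvKeyA false).Perm al := PySem.List.sorted_perm al pvKeyA false
        have hany : ((PySem.List.sorted al pvKeyA false).any fun e => decide ((PySem.Dict.mk e).get? "date" = some s))
            = (al.any fun e => decide ((PySem.Dict.mk e).get? "date" = some s)) := by
          rcases h : al.any fun e => decide ((PySem.Dict.mk e).get? "date" = some s)
          · simp only [List.any_eq_false] at h ⊢
            intro x hx; exact h x (hperm.mem_iff.mp hx)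
          · obtain ⟨x, hx, hxs⟩ := List.any_eq_true.mp h
            exact List.any_eq_true.mpr ⟨x, hperm.mem_iff.mpr hx, hxs⟩
        have hcnt : (PySem.List.sorted al pvKeyA false).countP (fun e => decide (pvKeyA e < s))
            = al.countP (fun e => decide (pvKeyA e < s)) := hperm.countP_eq _
        have hcq : al.countP (fun e => decide (¬ (PySem.Dict.mk e).get? "date" = some s ∧ pvKeyA e < s))
            = al.countP (fun e => decide (pvKeyA e < s)) := by
          apply List.countP_congr
          intro x _
          simp only [decide_eq_true_eq]
          constructor
          · rintro ⟨_, h⟩; exact h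
          · intro h
            refine ⟨fun hm => ?_, h⟩
            have hx : pvKeyA x = s := (pvKeyA_eq_iff x s hs).mpr hm
            exact absurd h (by rw [hx]; exact lt_irrefl s)
        rw [hany, hcnt, hcq]
        by_cases ha : (al.any fun e => decide ((PySem.Dict.mk e).get? "date" = some s)) = true
        · rw [if_pos ha, ha]
          norm_num
        · rw [if_neg ha]
          simp only [Bool.not_eq_true] at ha
          rw [ha]
          simp
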